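-- pv_equiv track=rewrite | github.com/maxime-bc/tp-graph-python | src/utils.py | adjacency_list_to_line_graph_list
-- ===== SOURCE A (Python) =====
-- from typing import List, Tuple
--
-- def adjacency_list_to_line_graph_list(adjacency_list: List[List[int]]) -> List[List[int]]:
--     vertices_num = len(adjacency_list)
--     lines_list = []
--
--     for i in range(vertices_num):
--         for j in range(len(adjacency_list[i])):
--             vertex_to_add = [i, adjacency_list[i][j]]
--             reversed_vertex_to_add = [adjacency_list[i][j], i]
--
--             if reversed_vertex_to_add not in lines_list:
--                 lines_list.append(vertex_to_add)
--
--     lines_list_len = len(lines_list)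
--     line_graph_adjacency_list = [[] for i in range(lines_list_len)]
--
--     for i in range(lines_list_len):
--         for j in range(lines_list_len):
--
--             if lines_list[i] != lines_list[j]:
--                 if lines_list[i][0] in lines_list[j] or lines_list[i][1] in lines_list[j]:
--                     line_graph_adjacency_list[i].extend([j])
--
--     return line_graph_adjacency_list
-- ===== SOURCE B (Python) =====
-- def adjacency_list_to_line_graph_list(adjacency_list):
--     # Phase 1: collect the line-graph vertices (edges), skipping an edge whose
--     # reverse was already collected; a hash set replaces A's linear membership scan.
--     edges = []
--     present = set()
--     for i, nbrs in enumerate(adjacency_list):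
--         for v in nbrs:
--             if (v, i) not in present:
--                 edges.append((i, v))
--                 present.add((i, v))
--
--     # Phase 2: index edges by incident vertex, then read each edge's neighbours
--     # off the two vertex groups instead of scanning all edge pairs.
--     groups = {}
--     for idx, (a, b) in enumerate(edges):
--         groups.setdefault(a, []).append(idx)
--         if b != a:
--             groups.setdefault(b, []).append(idx)
--
--     result = []
--     for a, b in edges:
--         cand = groups[a] + groups[b] if b != a else groups[a]
--         result.append(sorted({j for j in cand if edges[j] != (a, b)}))
--     return result
-- ===== Notes on version B (the rewrite author's own statement) =====
-- stated objective: faster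
-- what changed: B dedups edges through a hash set instead of A's linear membership scan, and builds a vertex-to-edge-indices index once so each line-graph row is read off the edge's two vertex groups (dedup + sort) instead of A's all-pairs scan over every other edge.
import Mathlib
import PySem

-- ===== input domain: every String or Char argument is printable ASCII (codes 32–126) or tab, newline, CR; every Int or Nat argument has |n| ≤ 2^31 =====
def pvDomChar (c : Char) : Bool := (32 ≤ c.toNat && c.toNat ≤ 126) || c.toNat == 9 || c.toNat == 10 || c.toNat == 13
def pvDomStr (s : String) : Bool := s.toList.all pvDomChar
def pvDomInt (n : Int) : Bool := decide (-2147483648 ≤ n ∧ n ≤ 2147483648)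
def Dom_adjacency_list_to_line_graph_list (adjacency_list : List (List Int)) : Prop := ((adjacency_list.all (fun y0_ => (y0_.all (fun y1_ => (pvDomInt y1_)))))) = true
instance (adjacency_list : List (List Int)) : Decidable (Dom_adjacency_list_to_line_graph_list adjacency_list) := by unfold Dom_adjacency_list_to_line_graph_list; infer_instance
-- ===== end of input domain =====

-- B replaces A's quadratic all-pairs edge scans by a hash-set edge dedup and a
-- vertex→edge-indices index (per-edge neighbour rows read off two vertex groups,
-- deduplicated and sorted); same output, asymptotically faster.

-- ===== PORT A =====
def adjacency_list_to_line_graph_list (adjacency_list : List (List Int)) : List (List Int) :=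
  let vertices_num : Int := adjacency_list.length
  let lines_list : List (List Int) :=
    (PySem.List.pyRange 0 vertices_num 1).foldl (fun lines i =>
      (PySem.List.pyRange 0 ((PySem.List.pyGetD adjacency_list i []).length : Int) 1).foldl
        (fun lines j =>
          let x := PySem.List.pyGetD (PySem.List.pyGetD adjacency_list i []) j 0
          let vertex_to_add : List Int := [i, x]
          let reversed_vertex_to_add : List Int := [x, i]
          if reversed_vertex_to_add ∈ lines then lines else lines ++ [vertex_to_add]) lines) []
  let lines_list_len : Int := lines_list.length
  let init : List (List Int) := (PySem.List.pyRange 0 lines_list_len 1).map (fun _ => [])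
  (PySem.List.pyRange 0 lines_list_len 1).foldl (fun L i =>
    (PySem.List.pyRange 0 lines_list_len 1).foldl (fun L j =>
      let ei := PySem.List.pyGetD lines_list i []
      let ej := PySem.List.pyGetD lines_list j []
      if ei ≠ ej then
        if PySem.List.pyGetD ei 0 0 ∈ ej ∨ PySem.List.pyGetD ei 1 0 ∈ ej then
          PySem.List.pySetD L i (PySem.List.pyGetD L i [] ++ [j])
        else L
      else L) L) init

-- ===== PORT B =====
def adjacency_list_to_line_graph_list_alt (adjacency_list : List (List Int)) : List (List Int) :=
  -- phase 1: dedup edges with a hash set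
  let st : List (Int × Int) × PySem.Set (Int × Int) :=
    (PySem.List.enumerate adjacency_list).foldl (fun st p =>
      p.2.foldl (fun st v =>
        if PySem.Set.contains st.2 (v, p.1) then st
        else (st.1 ++ [(p.1, v)], PySem.Set.add st.2 (p.1, v))) st)
      ([], PySem.Set.empty)
  let edges := st.1
  -- phase 2: index edge ids by incident vertex
  let groups : PySem.Dict Int (List Int) :=
    (PySem.List.enumerate edges).foldl (fun d p =>
      let d1 := d.insert p.2.1 (d.getD p.2.1 [] ++ [p.1])
      if p.2.2 ≠ p.2.1 then d1.insert p.2.2 (d1.getD p.2.2 [] ++ [p.1]) else d1)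
      PySem.Dict.empty
  edges.map (fun e =>
    let cand := if e.2 ≠ e.1 then groups.getD e.1 [] ++ groups.getD e.2 [] else groups.getD e.1 []
    PySem.List.sorted
      (PySem.Set.ofList (cand.filter (fun j => decide (PySem.List.pyGetD edges j (0, 0) ≠ e))))
      (fun x => x) false)

-- ===== PRECONDITION & SPEC =====
def Spec_adjacency_list_to_line_graph_list (adjacency_list : List (List Int)) (out : List (List Int)) : Prop := out = adjacency_list_to_line_graph_list_alt adjacency_list
instance (adjacency_list : List (List Int)) (out : List (List Int)) : Decidable (Spec_adjacency_list_to_line_graph_list adjacency_list out) := by unfold Spec_adjacency_list_to_line_graph_list; infer_instance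

-- ===== CLAIM (what is proved, stated in full; the proofs are below) =====
def Claim_equal_adjacency_list_to_line_graph_list : Prop := ∀ (adjacency_list : List (List Int)), Dom_adjacency_list_to_line_graph_list adjacency_list → Spec_adjacency_list_to_line_graph_list adjacency_list (adjacency_list_to_line_graph_list adjacency_list)

-- ===== LEMMAS AND PROOFS =====

-- edge as the 2-element list A stores
def pvP2L (e : Int × Int) : List Int := [e.1, e.2]

theorem pvP2L_inj : Function.Injective pvP2L := by
  intro a b h
  simp [pvP2L] at h
  exact Prod.ext h.1 h.2

-- ----- phase 1 -----

def pvAStep1 (lines : List (List Int)) (p : Int × List Int) : List (List Int) :=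
  p.2.foldl (fun lines x =>
    if [x, p.1] ∈ lines then lines else lines ++ [[p.1, x]]) lines

def pvBStep1 (st : List (Int × Int) × PySem.Set (Int × Int)) (p : Int × List Int) :
    List (Int × Int) × PySem.Set (Int × Int) :=
  p.2.foldl (fun st v =>
    if PySem.Set.contains st.2 (v, p.1) then st
    else (st.1 ++ [(p.1, v)], PySem.Set.add st.2 (p.1, v))) st

theorem pvPhase1_inner (i : Int) (row : List Int) (edges : List (Int × Int)) :
    pvBStep1 (edges, PySem.Set.ofList edges) (i, row)
      = ((pvBStep1 (edges, PySem.Set.ofList edges) (i, row)).1,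
         PySem.Set.ofList (pvBStep1 (edges, PySem.Set.ofList edges) (i, row)).1)
    ∧ pvAStep1 (edges.map pvP2L) (i, row)
      = (pvBStep1 (edges, PySem.Set.ofList edges) (i, row)).1.map pvP2L := by
  unfold pvAStep1 pvBStep1
  induction row generalizing edges with
  | nil => exact ⟨rfl, rfl⟩
  | cons v t ih =>
    simp only [List.foldl_cons]
    have hmem : ([v, i] ∈ edges.map pvP2L) ↔ ((v, i) ∈ edges) := by
      constructor
      · intro h
        rcases List.mem_map.mp h with ⟨e, he, hev⟩
        have : e = (v, i) := pvP2L_inj hev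
        rwa [this] at he
      · intro h
        exact List.mem_map.mpr ⟨(v, i), h, rfl⟩
    by_cases h : (v, i) ∈ edges
    · have hc : PySem.Set.contains (PySem.Set.ofList edges) (v, i) = true := by
        rw [PySem.Set.contains_iff, PySem.Set.mem_ofList]; exact h
      rw [hc, if_pos (hmem.mpr h), if_pos rfl]
      exact ih edges
    · have hc : PySem.Set.contains (PySem.Set.ofList edges) (v, i) = false := by
        rw [Bool.eq_false_iff]
        intro hct
        exact h ((PySem.Set.mem_ofList _ _).mp ((PySem.Set.contains_iff _ _).mp hct))
      rw [hc, if_neg (fun hm => h (hmem.mp hm))]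
      simp only [Bool.false_eq_true, if_false]
      have hset : PySem.Set.add (PySem.Set.ofList edges) (i, v)
          = PySem.Set.ofList (edges ++ [(i, v)]) :=
        (PySem.Set.ofList_append_singleton edges (i, v)).symm
      have hmap : edges.map pvP2L ++ [[i, v]] = (edges ++ [(i, v)]).map pvP2L := by
        simp [pvP2L]
      rw [hset, hmap]
      exact ih (edges ++ [(i, v)])

theorem pvPhase1 (l : List (Int × List Int)) (edges : List (Int × Int)) :
    l.foldl pvAStep1 (edges.map pvP2L)
      = (l.foldl pvBStep1 (edges, PySem.Set.ofList edges)).1.map pvP2L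
    ∧ (l.foldl pvBStep1 (edges, PySem.Set.ofList edges)).2
      = PySem.Set.ofList (l.foldl pvBStep1 (edges, PySem.Set.ofList edges)).1 := by
  induction l generalizing edges with
  | nil => exact ⟨rfl, rfl⟩
  | cons p t ih =>
    simp only [List.foldl_cons]
    obtain ⟨hshape, hmap⟩ := pvPhase1_inner p.1 p.2 edges
    have hp : (p.1, p.2) = p := rfl
    rw [hp] at hshape hmap
    rw [hmap, hshape]
    exact ih (pvBStep1 (edges, PySem.Set.ofList edges) p).1

-- ----- phase 2: groups characterisation -----

def pvIncident (edges : List (Int × Int)) (v : Int) (j : Int) : Bool :=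
  decide (v = (PySem.List.pyGetD edges j (0, 0)).1 ∨ v = (PySem.List.pyGetD edges j (0, 0)).2)

def pvGStep (d : PySem.Dict Int (List Int)) (p : Int × (Int × Int)) : PySem.Dict Int (List Int) :=
  let d1 := d.insert p.2.1 (d.getD p.2.1 [] ++ [p.1])
  if p.2.2 ≠ p.2.1 then d1.insert p.2.2 (d1.getD p.2.2 [] ++ [p.1]) else d1

theorem pvGStep_getD (d : PySem.Dict Int (List Int)) (idx : Int) (e : Int × Int) (v : Int) :
    (pvGStep d (idx, e)).getD v []
      = d.getD v [] ++ (if v = e.1 ∨ v = e.2 then [idx] else []) := by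
  unfold pvGStep
  by_cases hba : e.2 ≠ e.1
  · rw [if_pos hba, PySem.Dict.getD_insert, PySem.Dict.getD_insert, PySem.Dict.getD_insert]
    by_cases hvb : v = e.2
    · subst hvb
      simp [hba]
    · by_cases hva : v = e.1
      · subst hva
        simp [hvb]
      · simp [hva, hvb]
  · rw [not_not] at hba
    rw [if_neg (by simp [hba]), PySem.Dict.getD_insert]
    by_cases hva : v = e.1
    · simp [hva]
    · simp [hva, hba ▸ hva]

theorem pvGroups (edges : List (Int × Int)) (v : Int) :
    ((PySem.List.enumerate edges).foldl pvGStep PySem.Dict.empty).getD v []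
      = (PySem.List.pyRange 0 (edges.length : Int) 1).filter (pvIncident edges v) := by
  induction edges using List.reverseRecOn with
  | nil => simp [PySem.Dict.getD_empty]
  | append_singleton es e ih =>
    rw [PySem.List.enumerate_append]
    simp only [List.foldl_append, PySem.List.enumerate_cons, PySem.List.enumerate_nil,
      List.foldl_cons, List.foldl_nil]
    have hlen : (((es ++ [e]).length : Int)) = (es.length : Int) + 1 := by
      simp [List.length_append]
    rw [hlen, PySem.List.pyRange_one_succ_right (by positivity)]
    rw [List.filter_append]
    have hfc : (PySem.List.pyRange 0 (es.length : Int) 1).filter (pvIncident (es ++ [e]) v)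
        = (PySem.List.pyRange 0 (es.length : Int) 1).filter (pvIncident es v) := by
      apply List.filter_congr
      intro j hj
      rcases PySem.List.mem_pyRange_one.mp hj with ⟨h0, h1⟩
      unfold pvIncident
      rw [PySem.List.pyGetD_eq_getElem (es ++ [e]) (0, 0) h0 (by simp; omega),
          PySem.List.pyGetD_eq_getElem es (0, 0) h0 (by simpa using h1)]
      rw [List.getElem_append_left (by omega)]
    rw [hfc, ← ih]
    have hlast : PySem.List.pyGetD (es ++ [e]) (es.length : Int) (0, 0) = e := by
      rw [PySem.List.pyGetD_eq_getElem (es ++ [e]) (0, 0) (by positivity) (by simp)]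
      simp
    have hstep : (pvGStep ((PySem.List.enumerate es).foldl pvGStep PySem.Dict.empty)
        (0 + (es.length : Int), e)).getD v []
        = ((PySem.List.enumerate es).foldl pvGStep PySem.Dict.empty).getD v []
          ++ (if v = e.1 ∨ v = e.2 then [(es.length : Int)] else []) := by
      have := pvGStep_getD ((PySem.List.enumerate es).foldl pvGStep PySem.Dict.empty)
        (0 + (es.length : Int)) e v
      simpa using this
    rw [hstep]
    congr 1
    unfold pvIncident
    simp only [List.filter_cons, List.filter_nil, hlast]
    by_cases hv : v = e.1 ∨ v = e.2 <;> simp [hv]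

-- A's neighbour row for an edge value e
def pvARow (edges : List (Int × Int)) (e : Int × Int) : List Int :=
  (PySem.List.pyRange 0 (edges.length : Int) 1).filter (fun j =>
    decide (PySem.List.pyGetD edges j (0, 0) ≠ e)
    && (pvIncident edges e.1 j || pvIncident edges e.2 j))

theorem pvRow_eq (edges : List (Int × Int)) (e : Int × Int) :
    PySem.List.sorted
      (PySem.Set.ofList
        ((if e.2 ≠ e.1
            then ((PySem.List.enumerate edges).foldl pvGStep PySem.Dict.empty).getD e.1 []
                 ++ ((PySem.List.enumerate edges).foldl pvGStep PySem.Dict.empty).getD e.2 []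
            else ((PySem.List.enumerate edges).foldl pvGStep PySem.Dict.empty).getD e.1 []).filter
          (fun j => decide (PySem.List.pyGetD edges j (0, 0) ≠ e))))
      (fun x => x) false = pvARow edges e := by
  rw [pvGroups, pvGroups]
  apply PySem.List.sorted_eq_of_perm_of_pairwise_lt
  · have hnA : (pvARow edges e).Nodup := (PySem.List.nodup_pyRange_one 0 _).filter _
    have hnB := PySem.Set.nodup_ofList (α := Int)
    rw [List.perm_ext_iff_of_nodup hnA (hnB _)]
    intro j
    unfold pvARow
    by_cases hba : e.2 ≠ e.1
    · rw [if_pos hba]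
      simp only [List.mem_filter, PySem.Set.mem_ofList, List.mem_append,
        Bool.and_eq_true, Bool.or_eq_true, decide_eq_true_eq]
      tauto
    · rw [if_neg hba]
      rw [not_not] at hba
      simp only [List.mem_filter, PySem.Set.mem_ofList, hba,
        Bool.and_eq_true, Bool.or_eq_true, decide_eq_true_eq, or_self]
      tauto
  · exact (PySem.List.pairwise_lt_pyRange_one 0 _).filter _

theorem pvSetFold (f : Int → Prop) [DecidablePred f] (i : Nat) (l : List Int) :
    ∀ (L : List (List Int)), i < L.length →
    l.foldl (fun L j => if f j then PySem.List.pySetD L (i : Int) (PySem.List.pyGetD L (i : Int) [] ++ [j]) else L) L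
      = PySem.List.pySetD L (i : Int) (PySem.List.pyGetD L (i : Int) [] ++ l.filter (fun j => decide (f j))) := by
  induction l with
  | nil =>
    intro L hi
    simp only [List.foldl_nil, List.filter_nil, List.append_nil,
      PySem.List.pySetD_natCast, PySem.List.pyGetD_natCast]
    rw [List.getD_eq_getElem _ _ hi]
    exact (List.set_getElem_self hi).symm
  | cons j t ih =>
    intro L hi
    simp only [List.foldl_cons, List.filter_cons]
    by_cases hf : f j
    · rw [if_pos hf, if_pos (by simp [hf]),
        ih _ (by simp [PySem.List.pySetD_natCast, hi, List.length_set])]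
      simp only [PySem.List.pySetD_natCast, PySem.List.pyGetD_natCast]
      rw [List.set_set]
      congr 1
      rw [List.getD_eq_getElem _ _ (by simp [List.length_set]; exact hi),
        List.getElem_set, if_pos rfl, List.getD_eq_getElem _ _ hi]
      simp
    · rw [if_neg hf, if_neg (by simp [hf])]
      exact ih L hi

theorem pvOuter (n : Nat) (R : Int → List Int) (cond : Int → Int → Prop)
    [∀ i j, Decidable (cond i j)]
    (hR : ∀ i : Int, 0 ≤ i → i < (n : Int) →
      R i = (PySem.List.pyRange 0 (n : Int) 1).filter (fun j => decide (cond i j))) :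
    ∀ m : Nat, m ≤ n →
    (PySem.List.pyRange 0 (m : Int) 1).foldl (fun L i =>
      (PySem.List.pyRange 0 (n : Int) 1).foldl (fun L j =>
        if cond i j then PySem.List.pySetD L i (PySem.List.pyGetD L i [] ++ [j]) else L) L)
      ((PySem.List.pyRange 0 (n : Int) 1).map (fun _ => []))
    = (PySem.List.pyRange 0 (n : Int) 1).map (fun i => if i < (m : Int) then R i else []) := by
  intro m
  induction m with
  | zero =>
    intro _
    simp only [Nat.cast_zero, PySem.List.pyRange_zero]
    simp
  | succ m ih =>
    intro hm
    have hm' : m ≤ n := Nat.le_of_succ_le hm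
    have hcast : ((m + 1 : Nat) : Int) = (m : Int) + 1 := by push_cast; ring
    rw [hcast, PySem.List.pyRange_one_succ_right (by positivity), List.foldl_append,
      ih hm', List.foldl_cons, List.foldl_nil]
    have hlenL : ((PySem.List.pyRange 0 (n : Int) 1).map
        (fun i => if i < (m : Int) then R i else [])).length = n := by
      simp [PySem.List.length_pyRange_one]
    rw [pvSetFold (cond (m : Int)) m _ _ (by rw [hlenL]; omega)]
    have hrow : PySem.List.pyGetD ((PySem.List.pyRange 0 (n : Int) 1).map
        (fun i => if i < (m : Int) then R i else [])) (m : Int) [] = [] := by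
      rw [PySem.List.pyGetD_map_pyRange _ n m _ (by omega)]
      simp
    rw [hrow, List.nil_append, ← hR (m : Int) (by positivity) (by exact_mod_cast Nat.lt_of_succ_le hm)]
    rw [PySem.List.pySetD_natCast]
    apply List.ext_getElem
    · simp [PySem.List.length_pyRange_one]
    · intro k hk1 hk2
      rw [List.getElem_set]
      have hkn : k < n := by
        simp [List.length_set, PySem.List.length_pyRange_one] at hk1
        omega
      have hget : ∀ (g : Int → List Int),
          ((PySem.List.pyRange 0 (n : Int) 1).map g)[k]'(by simp [PySem.List.length_pyRange_one]; omega)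
          = g (k : Int) := by
        intro g
        rw [List.getElem_map, PySem.List.getElem_pyRange_one]
        simp
      rw [hget, hget]
      by_cases hkm : k = m
      · subst hkm
        rw [if_pos rfl, if_pos (by omega)]
      · rw [if_neg (fun h => hkm h.symm)]
        by_cases hlt : (k : Int) < (m : Int)
        · rw [if_pos hlt, if_pos (by omega)]
        · have hkm' : (k : Int) ≠ (m : Int) := by exact_mod_cast hkm
          rw [if_neg hlt, if_neg (by omega)]

theorem pvPhase2 (edges : List (Int × Int)) :
    (PySem.List.pyRange 0 ((edges.map pvP2L).length : Int) 1).foldl (fun L i =>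
      (PySem.List.pyRange 0 ((edges.map pvP2L).length : Int) 1).foldl (fun L j =>
        let ei := PySem.List.pyGetD (edges.map pvP2L) i []
        let ej := PySem.List.pyGetD (edges.map pvP2L) j []
        if ei ≠ ej then
          if PySem.List.pyGetD ei 0 0 ∈ ej ∨ PySem.List.pyGetD ei 1 0 ∈ ej then
            PySem.List.pySetD L i (PySem.List.pyGetD L i [] ++ [j])
          else L
        else L) L)
      ((PySem.List.pyRange 0 ((edges.map pvP2L).length : Int) 1).map (fun _ => []))
      = edges.map (pvARow edges) := by
  simp only [List.length_map]
  have h := pvOuter edges.length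
    (fun i => (PySem.List.pyRange 0 (edges.length : Int) 1).filter
      (fun j => decide (PySem.List.pyGetD (edges.map pvP2L) i [] ≠ PySem.List.pyGetD (edges.map pvP2L) j []
        ∧ (PySem.List.pyGetD (PySem.List.pyGetD (edges.map pvP2L) i []) 0 0 ∈ PySem.List.pyGetD (edges.map pvP2L) j []
           ∨ PySem.List.pyGetD (PySem.List.pyGetD (edges.map pvP2L) i []) 1 0 ∈ PySem.List.pyGetD (edges.map pvP2L) j []))))
    (fun i j => PySem.List.pyGetD (edges.map pvP2L) i [] ≠ PySem.List.pyGetD (edges.map pvP2L) j []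
        ∧ (PySem.List.pyGetD (PySem.List.pyGetD (edges.map pvP2L) i []) 0 0 ∈ PySem.List.pyGetD (edges.map pvP2L) j []
           ∨ PySem.List.pyGetD (PySem.List.pyGetD (edges.map pvP2L) i []) 1 0 ∈ PySem.List.pyGetD (edges.map pvP2L) j []))
    (fun _ _ _ => rfl) edges.length le_rfl
  simp only [← ite_and]
  rw [h]
  have hmap : edges.map (pvARow edges)
      = ((PySem.List.pyRange 0 (edges.length : Int) 1).map
          (fun i => PySem.List.pyGetD edges i (0, 0))).map (pvARow edges) := by
    rw [PySem.List.map_pyGetD_pyRange_zero' edges (0, 0)]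
  rw [hmap, List.map_map]
  apply List.map_congr_left
  intro i hi
  rcases PySem.List.mem_pyRange_one.mp hi with ⟨hi0, hi1⟩
  rw [if_pos hi1]
  unfold pvARow
  apply List.filter_congr
  intro j hj
  rcases PySem.List.mem_pyRange_one.mp hj with ⟨hj0, hj1⟩
  have hget : ∀ k : Int, 0 ≤ k → k < (edges.length : Int) →
      PySem.List.pyGetD (edges.map pvP2L) k []
        = pvP2L (PySem.List.pyGetD edges k (0, 0)) := by
    intro k hk0 hk1
    rw [PySem.List.pyGetD_eq_getElem _ _ hk0 (by simpa using hk1),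
        PySem.List.pyGetD_eq_getElem _ _ hk0 hk1, List.getElem_map]
  set a := PySem.List.pyGetD edges i (0, 0) with ha
  set b := PySem.List.pyGetD edges j (0, 0) with hb
  rw [hget i hi0 hi1, hget j hj0 hj1]
  unfold pvIncident
  rw [← hb]
  have h0 : PySem.List.pyGetD (pvP2L a) 0 0 = a.1 := PySem.List.pyGetD_zero_cons _ _ _
  have h1 : PySem.List.pyGetD (pvP2L a) 1 0 = a.2 := by
    unfold pvP2L
    rw [show (1 : Int) = ((1 : Nat) : Int) by norm_num, PySem.List.pyGetD_natCast]
    rfl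
  rw [h0, h1]
  have hne : (pvP2L a ≠ pvP2L b) ↔ a ≠ b := not_congr ⟨fun h => pvP2L_inj h, fun h => h ▸ rfl⟩
  simp only [pvP2L, List.mem_cons, List.not_mem_nil, or_false, Bool.decide_and, Bool.decide_or]
  simp only [pvP2L] at hne
  simp only [← ha]
  congr 1
  rw [decide_eq_decide, hne]
  exact ne_comm

-- the deduplicated edge list both programs build (B's phase-1 result)
def pvEdges (al : List (List Int)) : List (Int × Int) :=
  ((PySem.List.enumerate al).foldl pvBStep1 ([], PySem.Set.ofList [])).1

theorem pvB_eq (al : List (List Int)) :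
    adjacency_list_to_line_graph_list_alt al = (pvEdges al).map (pvARow (pvEdges al)) := by
  show (pvEdges al).map _ = _
  apply List.map_congr_left
  intro e _
  exact pvRow_eq (pvEdges al) e

theorem pvA_eq (al : List (List Int)) :
    adjacency_list_to_line_graph_list al = (pvEdges al).map (pvARow (pvEdges al)) := by
  unfold adjacency_list_to_line_graph_list
  dsimp only
  have hinner : ∀ (lines : List (List Int)) (i : Int),
      (PySem.List.pyRange 0 ((PySem.List.pyGetD al i []).length : Int) 1).foldl
        (fun lines j =>
          let x := PySem.List.pyGetD (PySem.List.pyGetD al i []) j 0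
          let vertex_to_add : List Int := [i, x]
          let reversed_vertex_to_add : List Int := [x, i]
          if reversed_vertex_to_add ∈ lines then lines else lines ++ [vertex_to_add]) lines
      = pvAStep1 lines (i, PySem.List.pyGetD al i []) := by
    intro lines i
    exact PySem.List.foldl_pyRange_zero_pyGetD' (PySem.List.pyGetD al i []) 0
      (fun lines x => if [x, i] ∈ lines then lines else lines ++ [[i, x]]) lines
  have h1 : (PySem.List.pyRange 0 (al.length : Int) 1).foldl (fun lines i =>
      (PySem.List.pyRange 0 ((PySem.List.pyGetD al i []).length : Int) 1).foldl
        (fun lines j =>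
          let x := PySem.List.pyGetD (PySem.List.pyGetD al i []) j 0
          let vertex_to_add : List Int := [i, x]
          let reversed_vertex_to_add : List Int := [x, i]
          if reversed_vertex_to_add ∈ lines then lines else lines ++ [vertex_to_add]) lines) []
      = (pvEdges al).map pvP2L := by
    have hfun : (fun (lines : List (List Int)) (i : Int) =>
        (PySem.List.pyRange 0 ((PySem.List.pyGetD al i []).length : Int) 1).foldl
          (fun lines j =>
            let x := PySem.List.pyGetD (PySem.List.pyGetD al i []) j 0
            let vertex_to_add : List Int := [i, x]
            let reversed_vertex_to_add : List Int := [x, i]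
            if reversed_vertex_to_add ∈ lines then lines else lines ++ [vertex_to_add]) lines)
        = (fun lines i => pvAStep1 lines (i, PySem.List.pyGetD al i [])) := by
      funext lines i
      exact hinner lines i
    rw [hfun]
    have hmapfold : (PySem.List.pyRange 0 (al.length : Int) 1).foldl
        (fun lines i => pvAStep1 lines (i, PySem.List.pyGetD al i [])) []
        = ((PySem.List.pyRange 0 (al.length : Int) 1).map
            (fun i => (i, PySem.List.pyGetD al i []))).foldl pvAStep1 [] := by
      rw [List.foldl_map]
    rw [hmapfold]
    have henum : ((PySem.List.pyRange 0 (al.length : Int) 1).map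
        (fun i => (i, PySem.List.pyGetD al i []))) = PySem.List.enumerate al := by
      rw [PySem.List.enumerate_eq_map_pyRange al []]
      simp [PySem.List.len_eq]
    rw [henum]
    have := (pvPhase1 (PySem.List.enumerate al) []).1
    simpa [pvEdges] using this
  rw [h1]
  exact pvPhase2 (pvEdges al)

-- ===== VERDICT (by name: the statement is the Claim_ definition above) =====
theorem adjacency_list_to_line_graph_list_spec : Claim_equal_adjacency_list_to_line_graph_list := by
  intro al _
  show adjacency_list_to_line_graph_list al = adjacency_list_to_line_graph_list_alt al
  rw [pvA_eq, pvB_eq]
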